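-- pv_equiv track=rewrite | github.com/matsuo-atsushi/portfolio_1 | strategy_analyzer_app/poker_logic/poker_utils.py | assemble_exploit_plan
-- ===== SOURCE A (Python) =====
-- def assemble_exploit_plan(bias_data):
--     """
--     #TODO ここの内容は統計取るところでやったほうがいいと思う
--     jsonから、エクスプロイトの方針をまとめる
--     - Returns:
--         - agre: 頻度を増やすアクションが入る
--         - passi: 頻度を減らすアクション
--         - IP, OOP: このポジションのときに調整するアクション
--         - against: 相手がこのアクションしてきたときの調整するアクション
--         - gto: 特に調整がなければgto通りでいくけど、他に調整内容があったとしても、gto通りでいきたいときこれを入れる。最も優先度が高い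
--     """
--     # 箱を用意する
--     plan = {
--         'weak': {'agre': [], 'passi': []},
--         'weak_IP': {'agre': [], 'passi': []},
--         'weak_OOP': {'agre': [], 'passi': []},
--         'value': {'agre': [], 'passi': []},
--         'value_IP': {'agre': [], 'passi': []},
--         'value_against_Raise': {'agre': [], 'passi': []},
--         'strong': {'agre': [], 'passi': []},
--         'catcher': {'agre': [], 'passi': []},
--     }
--     # 方針を入れる
--     for bias_key, value in bias_data.items():
--         # Callし過ぎの相手
--         if bias_key == 'too_Call' and value:
--             plan['weak']['passi'] += ['Bet', 'Raise']
--             plan['value']['agre'] += ['Bet(small)']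
--         # Foldし過ぎの相手
--         if bias_key == 'too_Fold' and value:
--             plan['weak']['agre'] += ['Bet']
--             plan['value']['passi'] += ['Bet']
--             plan['strong']['agre'] += ['Bet']
--         # ブラフ関係
--         if bias_key == 'bluff':
--             # ブラフが少ない人
--             if value:
--                 plan['catcher']['agre'] += ['Call']
--                 plan['value']['agre'] += ['Bet']
--                 plan['weak']['agre'] += ['Raise(mini)']
--             # ブラフが多い人
--             elif value is False:
--                 plan['catcher']['passi'] += ['Call']
--                 plan['value']['agre'] += ['Bet(small)']
--                 plan['value_against_Raise']['agre'] += ['Fold']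
--                 plan['strong']['agre'] += ['gto']
--                 plan['weak']['agre'] += ['Bet']
--         # 罠好き関係
--         if bias_key == 'strong_hand':
--             # 強いハンドでCheckし過ぎる人
--             if value is False:
--                 plan['weak']['passi'] += ['Bet']
--                 plan['value']['passi'] += ['Bet']
--                 plan['value']['agre'] += ['Raise'] # <- valueBetは減らして、Betが来たときRaise頻度増やす
--                 plan['weak_IP']['passi'] += ['Bet']
--                 plan['weak_OOP']['agre'] += ['Bet']
--             # 強いハンドでBetし過ぎる人
--             elif value:
--                 plan['catcher']['passi'] += ['Call']
--                 plan['value_OOP']['agre'] += ['Bet']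
--                 plan['weak_OOP']['agre'] += ['Bet']
--                 # 全てRaiseは減らす
--                 for plan_key in plan:
--                     plan[plan_key]['passi'] += ['Raise']
--     return plan
-- ===== SOURCE B (Python) =====
-- # Table-driven rewrite: each (bias_key, value) pair maps to the ordered list of
-- # appends it causes; a None category means "append to every category".
-- _CATEGORIES = ['weak', 'weak_IP', 'weak_OOP', 'value', 'value_IP',
--                'value_against_Raise', 'strong', 'catcher']
--
-- _RULES = {
--     ('too_Call', True): [('weak', 'passi', ['Bet', 'Raise']),
--                          ('value', 'agre', ['Bet(small)'])],
--     ('too_Fold', True): [('weak', 'agre', ['Bet']),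
--                          ('value', 'passi', ['Bet']),
--                          ('strong', 'agre', ['Bet'])],
--     ('bluff', True): [('catcher', 'agre', ['Call']),
--                       ('value', 'agre', ['Bet']),
--                       ('weak', 'agre', ['Raise(mini)'])],
--     ('bluff', False): [('catcher', 'passi', ['Call']),
--                        ('value', 'agre', ['Bet(small)']),
--                        ('value_against_Raise', 'agre', ['Fold']),
--                        ('strong', 'agre', ['gto']),
--                        ('weak', 'agre', ['Bet'])],
--     ('strong_hand', False): [('weak', 'passi', ['Bet']),
--                              ('value', 'passi', ['Bet']),
--                              ('value', 'agre', ['Raise']),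
--                              ('weak_IP', 'passi', ['Bet']),
--                              ('weak_OOP', 'agre', ['Bet'])],
--     ('strong_hand', True): [('catcher', 'passi', ['Call']),
--                             ('weak_OOP', 'agre', ['Bet']),
--                             (None, 'passi', ['Raise'])],
-- }
--
--
-- def assemble_exploit_plan(bias_data):
--     plan = {c: {'agre': [], 'passi': []} for c in _CATEGORIES}
--     for key, value in bias_data.items():
--         for cat, side, items in _RULES.get((key, value), []):
--             if cat is None:
--                 for c in plan:
--                     plan[c][side] += items
--             else:
--                 plan[cat][side] += items
--     return plan
-- ===== Notes on version B (the rewrite author's own statement) =====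
-- stated objective: idiomatic
-- what changed: Replaces A's hard-coded if/elif chain of dict mutations with a declarative (bias_key, value) -> appends dispatch table applied by one generic loop (a None category meaning 'append to every category'); Pre_ keeps out the inputs where A raises KeyError and duplicate-key lists.
import Mathlib
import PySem

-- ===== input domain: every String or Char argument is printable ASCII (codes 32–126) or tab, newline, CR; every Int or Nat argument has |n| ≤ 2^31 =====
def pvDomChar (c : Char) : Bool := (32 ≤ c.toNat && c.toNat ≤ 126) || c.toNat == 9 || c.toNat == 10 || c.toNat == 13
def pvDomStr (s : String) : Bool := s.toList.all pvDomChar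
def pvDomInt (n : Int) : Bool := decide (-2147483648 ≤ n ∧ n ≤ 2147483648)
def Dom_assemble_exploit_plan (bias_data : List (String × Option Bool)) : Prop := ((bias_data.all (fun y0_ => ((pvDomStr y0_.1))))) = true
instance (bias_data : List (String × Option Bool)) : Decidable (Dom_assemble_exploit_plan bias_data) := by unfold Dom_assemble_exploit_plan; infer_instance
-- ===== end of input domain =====

-- B replaces A's if-chain by a declarative (bias_key, value) → appends dispatch table applied
-- by one generic loop (objective: idiomatic/data-driven; same cost).

-- shared helper: plan[cat][side] += items  (Python's dict-entry list append; no-op on a missing key,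
-- which under Pre_ is never reached where Python would raise)
def pvAdd (plan : List (String × List (String × List String))) (cat side : String)
    (items : List String) : List (String × List (String × List String)) :=
  plan.map (fun c =>
    if c.1 = cat then (c.1, c.2.map (fun s => if s.1 = side then (s.1, s.2 ++ items) else s))
    else c)

-- ===== PORT A =====
def pvInitPlanA : List (String × List (String × List String)) :=
  [("weak", [("agre", []), ("passi", [])]),
   ("weak_IP", [("agre", []), ("passi", [])]),
   ("weak_OOP", [("agre", []), ("passi", [])]),
   ("value", [("agre", []), ("passi", [])]),
   ("value_IP", [("agre", []), ("passi", [])]),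
   ("value_against_Raise", [("agre", []), ("passi", [])]),
   ("strong", [("agre", []), ("passi", [])]),
   ("catcher", [("agre", []), ("passi", [])])]

-- one iteration of A's `for bias_key, value in bias_data.items()` body (if-chain in source order)
def pvStepA (plan : List (String × List (String × List String))) (e : String × Option Bool) :
    List (String × List (String × List String)) :=
  let p1 := if e.1 = "too_Call" ∧ e.2 = some true then
      pvAdd (pvAdd plan "weak" "passi" ["Bet", "Raise"]) "value" "agre" ["Bet(small)"]
    else plan
  let p2 := if e.1 = "too_Fold" ∧ e.2 = some true then
      pvAdd (pvAdd (pvAdd p1 "weak" "agre" ["Bet"]) "value" "passi" ["Bet"]) "strong" "agre" ["Bet"]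
    else p1
  let p3 := if e.1 = "bluff" then
      (if e.2 = some true then
        pvAdd (pvAdd (pvAdd p2 "catcher" "agre" ["Call"]) "value" "agre" ["Bet"]) "weak" "agre" ["Raise(mini)"]
      else if e.2 = some false then
        pvAdd (pvAdd (pvAdd (pvAdd (pvAdd p2 "catcher" "passi" ["Call"]) "value" "agre" ["Bet(small)"])
          "value_against_Raise" "agre" ["Fold"]) "strong" "agre" ["gto"]) "weak" "agre" ["Bet"]
      else p2)
    else p2
  if e.1 = "strong_hand" then
    (if e.2 = some false then
      pvAdd (pvAdd (pvAdd (pvAdd (pvAdd p3 "weak" "passi" ["Bet"]) "value" "passi" ["Bet"])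
        "value" "agre" ["Raise"]) "weak_IP" "passi" ["Bet"]) "weak_OOP" "agre" ["Bet"]
    else if e.2 = some true then
      -- Python raises KeyError at plan['value_OOP'] on this path; Pre_ excludes it
      let q := pvAdd (pvAdd (pvAdd p3 "catcher" "passi" ["Call"]) "value_OOP" "agre" ["Bet"])
        "weak_OOP" "agre" ["Bet"]
      q.map (fun c => (c.1, c.2.map (fun s => if s.1 = "passi" then (s.1, s.2 ++ ["Raise"]) else s)))
    else p3)
  else p3

def assemble_exploit_plan (bias_data : List (String × Option Bool)) :
    List (String × List (String × List String)) :=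
  bias_data.foldl pvStepA pvInitPlanA

-- ===== PORT B =====
def pvCategories : List String :=
  ["weak", "weak_IP", "weak_OOP", "value", "value_IP", "value_against_Raise", "strong", "catcher"]

-- _RULES.get((key, value), []): the dispatch table; a `none` category means "every category"
def pvRules (key : String) (value : Option Bool) : List (Option String × String × List String) :=
  if key = "too_Call" ∧ value = some true then
    [(some "weak", "passi", ["Bet", "Raise"]), (some "value", "agre", ["Bet(small)"])]
  else if key = "too_Fold" ∧ value = some true then
    [(some "weak", "agre", ["Bet"]), (some "value", "passi", ["Bet"]), (some "strong", "agre", ["Bet"])]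
  else if key = "bluff" ∧ value = some true then
    [(some "catcher", "agre", ["Call"]), (some "value", "agre", ["Bet"]), (some "weak", "agre", ["Raise(mini)"])]
  else if key = "bluff" ∧ value = some false then
    [(some "catcher", "passi", ["Call"]), (some "value", "agre", ["Bet(small)"]),
     (some "value_against_Raise", "agre", ["Fold"]), (some "strong", "agre", ["gto"]),
     (some "weak", "agre", ["Bet"])]
  else if key = "strong_hand" ∧ value = some false then
    [(some "weak", "passi", ["Bet"]), (some "value", "passi", ["Bet"]), (some "value", "agre", ["Raise"]),
     (some "weak_IP", "passi", ["Bet"]), (some "weak_OOP", "agre", ["Bet"])]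
  else if key = "strong_hand" ∧ value = some true then
    [(some "catcher", "passi", ["Call"]), (some "weak_OOP", "agre", ["Bet"]), (none, "passi", ["Raise"])]
  else []

def pvApplyRule (plan : List (String × List (String × List String)))
    (r : Option String × String × List String) : List (String × List (String × List String)) :=
  match r.1 with
  | none => plan.map (fun c => (c.1, c.2.map (fun s => if s.1 = r.2.1 then (s.1, s.2 ++ r.2.2) else s)))
  | some cat => pvAdd plan cat r.2.1 r.2.2

def assemble_exploit_plan_alt (bias_data : List (String × Option Bool)) :
    List (String × List (String × List String)) :=
  bias_data.foldl (fun plan e => (pvRules e.1 e.2).foldl pvApplyRule plan)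
    (pvCategories.map (fun c => (c, [("agre", []), ("passi", [])])))

-- ===== PRECONDITION & SPEC =====
-- Pre_ excludes (a) inputs whose ('strong_hand', True) entry makes A raise KeyError at the
-- undeclared plan['value_OOP'], and (b) lists with duplicate keys, which do not arise from a
-- Python dict (dict construction collapses them, so iterating the raw list is not A's behaviour).
def Pre_assemble_exploit_plan (bias_data : List (String × Option Bool)) : Prop :=
  (∀ e ∈ bias_data, e ≠ ("strong_hand", some true)) ∧ (bias_data.map Prod.fst).Nodup
instance (bias_data : List (String × Option Bool)) : Decidable (Pre_assemble_exploit_plan bias_data) := by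
  unfold Pre_assemble_exploit_plan; infer_instance

def pvWitness_assemble_exploit_plan : List (String × Option Bool) :=
  [("too_Call", some true), ("bluff", some false), ("strong_hand", some false)]

def Spec_assemble_exploit_plan (bias_data : List (String × Option Bool))
    (out : List (String × List (String × List String))) : Prop :=
  out = assemble_exploit_plan_alt bias_data
instance (bias_data : List (String × Option Bool)) (out : List (String × List (String × List String))) :
    Decidable (Spec_assemble_exploit_plan bias_data out) := by
  unfold Spec_assemble_exploit_plan; infer_instance

-- ===== CLAIM =====
def Claim_equal_assemble_exploit_plan : Prop :=
  ∀ (bias_data : List (String × Option Bool)), Dom_assemble_exploit_plan bias_data →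
    Pre_assemble_exploit_plan bias_data →
    Spec_assemble_exploit_plan bias_data (assemble_exploit_plan bias_data)


-- ===== LEMMAS AND PROOFS =====

-- the two loop bodies agree on every entry Pre_ admits
theorem pvStep_eq (p : List (String × List (String × List String))) (e : String × Option Bool)
    (h : e ≠ ("strong_hand", some true)) :
    pvStepA p e = (pvRules e.1 e.2).foldl pvApplyRule p := by
  obtain ⟨k, v⟩ := e
  rcases v with _ | b
  · by_cases h1 : k = "too_Call" <;> by_cases h2 : k = "too_Fold" <;>
      by_cases h3 : k = "bluff" <;> by_cases h4 : k = "strong_hand" <;>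
      simp_all [pvStepA, pvRules]
  · rcases b <;>
    by_cases h1 : k = "too_Call" <;> by_cases h2 : k = "too_Fold" <;>
      by_cases h3 : k = "bluff" <;> by_cases h4 : k = "strong_hand" <;>
      simp_all [pvStepA, pvRules, pvApplyRule]

theorem pvInit_eq :
    pvInitPlanA = pvCategories.map (fun c => (c, [("agre", []), ("passi", [])])) := by
  decide

theorem pvFold_eq (l : List (String × Option Bool)) (p : List (String × List (String × List String)))
    (h : ∀ e ∈ l, e ≠ ("strong_hand", some true)) :
    l.foldl pvStepA p = l.foldl (fun plan e => (pvRules e.1 e.2).foldl pvApplyRule plan) p := by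
  induction l generalizing p with
  | nil => rfl
  | cons a t ih =>
    simp only [List.foldl_cons]
    rw [pvStep_eq p a (h a (List.mem_cons_self))]
    exact ih _ (fun e he => h e (List.mem_cons_of_mem _ he))

-- ===== VERDICT =====
theorem assemble_exploit_plan_spec : Claim_equal_assemble_exploit_plan := by
  intro bias_data _ hpre
  unfold Spec_assemble_exploit_plan assemble_exploit_plan assemble_exploit_plan_alt
  rw [pvInit_eq]
  exact pvFold_eq bias_data _ hpre.1
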